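-- pv_equiv track=rewrite | github.com/DigitalHolography/AngioEye | .github/scripts/pipeline_docs_latex_gen.py | code_font_size
-- ===== SOURCE A (Python) =====
-- def code_font_size(value):
--     text = "" if value is None else str(value)
--     segments = []
--     for slash_part in text.split("/"):
--         segments.extend(piece for piece in slash_part.split("_") if piece)
--     max_segment_len = max((len(part) for part in segments), default=0)
--
--     if max_segment_len >= 30 or len(text) >= 95:
--         return r"\scriptsize"
--     if max_segment_len >= 22 or len(text) >= 70:
--         return r"\footnotesize"
--     return ""
-- ===== SOURCE B (Python) =====
-- def code_font_size(value):
--     text = "" if value is None else str(value)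
--     max_run = 0
--     cur = 0
--     for ch in text:
--         if ch == "/" or ch == "_":
--             cur = 0
--         else:
--             cur += 1
--             if cur > max_run:
--                 max_run = cur
--     if max_run >= 30 or len(text) >= 95:
--         return r"\scriptsize"
--     if max_run >= 22 or len(text) >= 70:
--         return r"\footnotesize"
--     return ""
-- ===== Notes on version B (the rewrite author's own statement) =====
-- stated objective: simpler
-- what changed: Replaces the nested separator-splitting passes that build a list of substring segments with a single character scan maintaining a running separator-free run counter whose maximum replaces the max segment length; no intermediate substring lists are built.
import Mathlib
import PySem

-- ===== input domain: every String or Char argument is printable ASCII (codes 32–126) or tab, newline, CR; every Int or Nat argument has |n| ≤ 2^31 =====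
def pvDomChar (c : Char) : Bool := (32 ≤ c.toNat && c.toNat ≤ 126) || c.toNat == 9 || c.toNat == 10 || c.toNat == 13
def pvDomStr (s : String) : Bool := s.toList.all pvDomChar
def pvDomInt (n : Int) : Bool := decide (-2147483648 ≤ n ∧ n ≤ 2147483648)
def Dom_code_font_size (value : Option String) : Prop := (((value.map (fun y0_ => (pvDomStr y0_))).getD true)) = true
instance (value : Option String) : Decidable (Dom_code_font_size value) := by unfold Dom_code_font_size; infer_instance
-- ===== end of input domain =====

-- B replaces A's nested split('/')/split('_') segment-list construction by a single
-- character scan with a running run-length counter (same result; no speed claim).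

-- ===== PORT A =====
def code_font_size (value : Option String) : String :=
  let text := (match value with | none => "" | some v => v)
  let segments := (PySem.Chars.splitOn text.toList ['/']).flatMap
      (fun slash_part => (PySem.Chars.splitOn slash_part ['_']).filter (fun piece => !piece.isEmpty))
  let maxSegmentLen := (PySem.List.max? (segments.map (fun part => PySem.Chars.len part)) id).getD 0
  if 30 ≤ maxSegmentLen ∨ 95 ≤ PySem.Chars.len text.toList then "\\scriptsize"
  else if 22 ≤ maxSegmentLen ∨ 70 ≤ PySem.Chars.len text.toList then "\\footnotesize"
  else ""

-- ===== PORT B =====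
def code_font_size_alt (value : Option String) : String :=
  let text := (match value with | none => "" | some v => v)
  let st := text.toList.foldl (fun (s : Nat × Nat) ch =>
      if ch = '/' ∨ ch = '_' then (s.1, 0) else (max s.1 (s.2 + 1), s.2 + 1)) (0, 0)
  if 30 ≤ st.1 ∨ 95 ≤ text.toList.length then "\\scriptsize"
  else if 22 ≤ st.1 ∨ 70 ≤ text.toList.length then "\\footnotesize"
  else ""

-- ===== PRECONDITION & SPEC =====
def Spec_code_font_size (value : Option String) (out : String) : Prop := out = code_font_size_alt value
instance (value : Option String) (out : String) : Decidable (Spec_code_font_size value out) := by unfold Spec_code_font_size; infer_instance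

-- ===== CLAIM (what is proved, stated in full; the proofs are below) =====
def Claim_equal_code_font_size : Prop := ∀ (value : Option String), Dom_code_font_size value → Spec_code_font_size value (code_font_size value)

-- ===== LEMMAS AND PROOFS =====

-- B's step function
def pvStep (s : Nat × Nat) (ch : Char) : Nat × Nat :=
  if ch = '/' ∨ ch = '_' then (s.1, 0) else (max s.1 (s.2 + 1), s.2 + 1)

-- the combined separator predicate
def pvSep (a : Char) : Bool := (a == '/') || (a == '_')

-- max of the lengths of a list of pieces
def pvM : List (List Char) → Nat
  | [] => 0
  | h :: t => max h.length (pvM t)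

-- max of the piece lengths with the first piece extended by c on the left
def pvBF (c : Nat) : List (List Char) → Nat
  | [] => 0
  | h :: t => max (c + h.length) (pvM t)

-- length of the last piece, the first piece extended by c
def pvLL (c : Nat) : List (List Char) → Nat
  | [] => c
  | [h] => c + h.length
  | _ :: h :: t => pvLL 0 (h :: t)

-- PySem.Chars.splitOn with a single-character separator is List.splitOnP
theorem pvGo_single (d : Char) : ∀ (fuel : Nat) (l cur : List Char) (accs : List (List Char)),
    l.length ≤ fuel →
    PySem.Chars.splitOn.go [d] fuel l cur accs =
      accs.reverse ++ (l.splitOnP (· == d)).modifyHead (cur.reverse ++ ·) := by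
  intro fuel
  induction fuel with
  | zero =>
    intro l cur accs hl
    have : l = [] := List.length_eq_zero_iff.mp (Nat.le_zero.mp hl)
    subst this
    simp [PySem.Chars.splitOn.go, List.splitOnP_nil]
  | succ n ih =>
    intro l cur accs hl
    cases l with
    | nil => simp [PySem.Chars.splitOn.go, List.splitOnP_nil]
    | cons c rest =>
      have hrest : rest.length ≤ n := by simp at hl; omega
      by_cases hc : c = d
      · subst hc
        have hpre : List.isPrefixOf [c] (c :: rest) = true := by
          simp [List.isPrefixOf]
        rw [PySem.Chars.splitOn.go]
        simp only [hpre, if_true]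
        rw [ih _ _ _ (by simpa using hrest)]
        simp [List.splitOnP_cons]
        cases hsp : rest.splitOnP (· == c) with
        | nil => exact absurd hsp (List.splitOnP_ne_nil _ _)
        | cons a b => simp
      · have hpre : List.isPrefixOf [d] (c :: rest) = false := by
          simp [List.isPrefixOf]; exact fun h => absurd h.symm hc
        rw [PySem.Chars.splitOn.go]
        simp only [hpre]
        rw [if_neg (by simp), ih _ _ _ hrest]
        have hb : (c == d) = false := by simp [hc]
        simp [List.splitOnP_cons, hb]
        cases hsp : rest.splitOnP (· == d) with
        | nil => exact absurd hsp (List.splitOnP_ne_nil _ _)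
        | cons a b => simp

theorem pvSplitOn_single (l : List Char) (d : Char) :
    PySem.Chars.splitOn l [d] = l.splitOnP (· == d) := by
  rw [PySem.Chars.splitOn, pvGo_single d _ _ _ _ (by omega)]
  cases hsp : l.splitOnP (· == d) with
  | nil => exact absurd hsp (List.splitOnP_ne_nil _ _)
  | cons a b => simp

-- splitting on q then each piece on r = splitting on (q or r)
theorem pvSplit_split (q r : Char → Bool) : ∀ (cs : List Char),
    (cs.splitOnP q).flatMap (List.splitOnP r) = cs.splitOnP (fun a => q a || r a) := by
  intro cs
  induction cs with
  | nil => simp [List.splitOnP_nil]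
  | cons c rest ih =>
    by_cases hq : q c
    · simp [List.splitOnP_cons, hq, List.splitOnP_nil, ih]
    · by_cases hr : r c
      · simp only [List.splitOnP_cons, hq, hr, Bool.false_or, if_true, if_false]
        cases hsp : rest.splitOnP q with
        | nil => exact absurd hsp (List.splitOnP_ne_nil _ _)
        | cons a b =>
          rw [hsp] at ih
          simp [List.splitOnP_cons, hr, ← ih]
      · simp only [List.splitOnP_cons, hq, hr, Bool.false_or, if_false]
        cases hsp : rest.splitOnP q with
        | nil => exact absurd hsp (List.splitOnP_ne_nil _ _)
        | cons a b =>
          rw [hsp] at ih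
          cases hsr : (a.splitOnP r) with
          | nil => exact absurd hsr (List.splitOnP_ne_nil _ _)
          | cons x y =>
            simp only [List.flatMap_cons, hsr] at ih
            simp only [Bool.false_eq_true, if_false, List.modifyHead_cons, List.flatMap_cons,
              List.splitOnP_cons, hr, hsr, ← ih, List.cons_append]

-- filtering inside a flatMap = filtering the flatMap
theorem pvFlatMap_filter (P : List Char → Bool) (f : List Char → List (List Char)) :
    ∀ (xs : List (List Char)), xs.flatMap (fun x => (f x).filter P) = (xs.flatMap f).filter P := by
  intro xs
  induction xs with
  | nil => simp
  | cons h t ih => simp [List.filter_append, ih]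

-- dropping empty pieces does not change the max length
theorem pvM_filter : ∀ (xs : List (List Char)), pvM (xs.filter (fun piece => !piece.isEmpty)) = pvM xs := by
  intro xs
  induction xs with
  | nil => rfl
  | cons h t ih =>
    by_cases hh : h.isEmpty
    · have : h = [] := by simpa [List.isEmpty_iff] using hh
      subst this
      simp [pvM, ih]
    · simp [List.filter_cons, hh, pvM, ih]

-- PySem.List.max? over Int lengths, with default 0, is pvM
theorem pvMaxFold (f : Option Int → Int → Option Int)
    (hf : ∀ (m x : Int), f (some m) x = if m < x then some x else some m) :
    ∀ (xs : List (List Char)) (a : Nat),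
    List.foldl f (some ((a : Nat) : Int)) (xs.map (fun part => PySem.Chars.len part))
    = some (((pvM xs ⊔ a : Nat) : Int)) := by
  intro xs
  induction xs with
  | nil => intro a; simp [pvM]
  | cons h t ih =>
    intro a
    simp only [List.map_cons, List.foldl_cons, hf]
    rw [show PySem.Chars.len h = ((h.length : Nat) : Int) from PySem.Chars.len_eq h]
    by_cases hax : ((a : Nat) : Int) < ((h.length : Nat) : Int)
    · rw [if_pos hax, ih h.length]
      have hle : a ≤ h.length := by exact_mod_cast Int.le_of_lt hax
      congr 1
      simp only [pvM]
      push_cast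
      omega
    · rw [if_neg hax, ih a]
      have hle : h.length ≤ a := by exact_mod_cast Int.not_lt.mp hax
      congr 1
      simp only [pvM]
      push_cast
      omega

theorem pvMax?_eq (xs : List (List Char)) :
    (PySem.List.max? (xs.map (fun part => PySem.Chars.len part)) id).getD 0 = (pvM xs : Int) := by
  cases xs with
  | nil => simp [PySem.List.max?, pvM]
  | cons h t =>
    simp only [PySem.List.max?, List.map_cons, List.foldl_cons]
    rw [show PySem.Chars.len h = ((h.length : Nat) : Int) from PySem.Chars.len_eq h]
    rw [pvMaxFold _ (fun m x => rfl) t h.length]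
    simp only [Option.getD_some, pvM]
    push_cast
    omega

-- the fold invariant of B's scan
theorem pvInv : ∀ (cs : List Char) (m c : Nat), c ≤ m →
    cs.foldl pvStep (m, c) =
      (max m (pvBF c (cs.splitOnP pvSep)), pvLL c (cs.splitOnP pvSep)) := by
  intro cs
  induction cs with
  | nil =>
    intro m c hcm
    simp [List.splitOnP_nil, pvBF, pvLL, pvM]
    omega
  | cons ch rest ih =>
    intro m c hcm
    by_cases hch : ch = '/' ∨ ch = '_'
    · have hsep : pvSep ch = true := by
        rcases hch with h | h <;> simp [pvSep, h]
      simp only [List.foldl_cons, pvStep, if_pos hch, List.splitOnP_cons, hsep, if_true]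
      rw [ih m 0 (Nat.zero_le m)]
      cases hsp : rest.splitOnP pvSep with
      | nil => exact absurd hsp (List.splitOnP_ne_nil _ _)
      | cons a b =>
        simp only [Prod.mk.injEq, pvBF, pvLL, pvM, List.length_nil]
        exact ⟨by omega, trivial⟩
    · have hsep : pvSep ch = false := by
        simp [pvSep]
        constructor <;> (intro h; exact hch (by simp [h]))
      simp only [List.foldl_cons, pvStep, if_neg hch, List.splitOnP_cons, hsep]
      rw [ih (max m (c + 1)) (c + 1) (by omega)]
      cases hsp : rest.splitOnP pvSep with
      | nil => exact absurd hsp (List.splitOnP_ne_nil _ _)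
      | cons a b =>
        simp only [Bool.false_eq_true, if_false, List.modifyHead_cons, Prod.mk.injEq,
          pvBF, pvM, List.length_cons]
        constructor
        · omega
        · cases b with
          | nil => simp [pvLL, List.length_cons]; omega
          | cons b0 bt => rfl

theorem pvScan_eq (cs : List Char) :
    (cs.foldl pvStep (0, 0)).1 = pvM (cs.splitOnP pvSep) := by
  rw [pvInv cs 0 0 (le_refl 0)]
  cases hsp : cs.splitOnP pvSep with
  | nil => exact absurd hsp (List.splitOnP_ne_nil _ _)
  | cons a b => simp [pvBF, pvM]

-- A's max segment length equals B's max run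
theorem pvMain (cs : List Char) :
    (PySem.List.max? ((((PySem.Chars.splitOn cs ['/']).flatMap
        (fun slash_part => (PySem.Chars.splitOn slash_part ['_']).filter (fun piece => !piece.isEmpty))).map
        (fun part => PySem.Chars.len part))) id).getD 0
      = ((cs.foldl pvStep (0, 0)).1 : Int) := by
  rw [pvMax?_eq, pvScan_eq]
  congr 1
  have h1 : (PySem.Chars.splitOn cs ['/']).flatMap
      (fun slash_part => (PySem.Chars.splitOn slash_part ['_']).filter (fun piece => !piece.isEmpty))
      = ((cs.splitOnP (· == '/')).flatMap (List.splitOnP (· == '_'))).filter (fun piece => !piece.isEmpty) := by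
    rw [pvSplitOn_single]
    rw [← pvFlatMap_filter]
    congr 1
    funext sp
    rw [pvSplitOn_single]
  rw [h1, pvSplit_split, pvM_filter]
  congr 1

-- ===== VERDICT (by name: the statement is the Claim_ definition above) =====
theorem code_font_size_spec : Claim_equal_code_font_size := by
  intro value _
  unfold Spec_code_font_size code_font_size code_font_size_alt
  cases value with
  | none => rfl
  | some v =>
    simp only
    have hstep : (fun (s : Nat × Nat) ch =>
        if ch = '/' ∨ ch = '_' then (s.1, 0) else (max s.1 (s.2 + 1), s.2 + 1)) = pvStep := rfl
    rw [hstep, pvMain v.toList]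
    rw [show PySem.Chars.len v.toList = ((v.toList.length : Nat) : Int) from PySem.Chars.len_eq _]
    have h1 : ((30 : Int) ≤ ((v.toList.foldl pvStep (0, 0)).1 : Int) ∨ (95 : Int) ≤ ((v.toList.length : Nat) : Int))
        ↔ (30 ≤ (v.toList.foldl pvStep (0, 0)).1 ∨ 95 ≤ v.toList.length) := by omega
    have h2 : ((22 : Int) ≤ ((v.toList.foldl pvStep (0, 0)).1 : Int) ∨ (70 : Int) ≤ ((v.toList.length : Nat) : Int))
        ↔ (22 ≤ (v.toList.foldl pvStep (0, 0)).1 ∨ 70 ≤ v.toList.length) := by omega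
    simp only [h1, h2]
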